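-- pv_equiv track=rewrite | github.com/Tay-Son/GH_CT | Algorithm/PRG-Completed/PRG 049993.py | solution
-- ===== SOURCE A (Python) =====
-- def solution(str_skilltree, lst_skillset):
--     tot_ = 0
--     set_ = set(list(str_skilltree))
--     for each_skillset in lst_skillset:
--         ptr_skilltree = 0
--         is_ = True
--         for each_skill in each_skillset:
--             if each_skill in set_:
--                 if each_skill == str_skilltree[ptr_skilltree]:
--                     ptr_skilltree += 1
--                 else:
--                     is_ = False
--                     break
--         tot_ += int(is_)
--
--     return tot_
-- ===== SOURCE B (Python) =====
-- def solution(str_skilltree, lst_skillset):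
--     tree = list(str_skilltree)
--     tree_set = set(tree)
--     total = 0
--     for skillset in lst_skillset:
--         ordered = [c for c in skillset if c in tree_set]
--         total += int(tree[:len(ordered)] == ordered)
--     return total
-- ===== Notes on version B (the rewrite author's own statement) =====
-- stated objective: simpler
-- what changed: A fuses filtering and comparison into one pointer-stepping loop with an early break; B first filters each skillset down to its tree skills and then decides validity by a single prefix comparison tree[:len(ordered)] == ordered, with no pointer, flag or break.
import Mathlib
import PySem

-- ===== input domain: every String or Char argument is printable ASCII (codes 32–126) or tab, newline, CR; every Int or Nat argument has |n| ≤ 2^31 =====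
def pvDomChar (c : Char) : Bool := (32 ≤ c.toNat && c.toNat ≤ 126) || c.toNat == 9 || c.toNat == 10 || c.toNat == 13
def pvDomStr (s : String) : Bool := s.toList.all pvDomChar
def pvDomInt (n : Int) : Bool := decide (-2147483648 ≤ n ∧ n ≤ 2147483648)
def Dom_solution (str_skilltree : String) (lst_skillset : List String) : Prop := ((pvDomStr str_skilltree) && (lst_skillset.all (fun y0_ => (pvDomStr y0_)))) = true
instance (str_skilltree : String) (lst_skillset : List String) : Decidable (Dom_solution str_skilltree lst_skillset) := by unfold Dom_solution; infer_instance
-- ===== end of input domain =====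

-- B replaces A's fused pointer-and-break scan by filter-then-prefix-comparison (simpler decomposition, same cost);
-- the equivalence is about the return value only (neither program mutates its arguments).

-- ===== PORT A =====
-- inner 'for each_skill in each_skillset' loop: state = (ptr_skilltree, is_); 'none' = the IndexError of str_skilltree[ptr]
def pvALoop (t : List Char) (st : PySem.Set Char) (ptr : Nat) : List Char → Option Bool
  | [] => some true
  | c :: rest =>
    if PySem.Set.contains st c then
      match PySem.List.pyGet? t (ptr : Int) with
      | none => none                     -- IndexError propagates
      | some tc => if c = tc then pvALoop t st (ptr + 1) rest else some false   -- break with is_ = False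
    else pvALoop t st ptr rest

def solution (str_skilltree : String) (lst_skillset : List String) : Int :=
  let set_ := PySem.Set.ofList str_skilltree.toList
  (lst_skillset.foldl
    (fun acc each_skillset =>
      acc.bind (fun tot =>
        (pvALoop str_skilltree.toList set_ 0 each_skillset.toList).map
          (fun is_ => tot + (if is_ then 1 else 0))))
    (some 0)).getD 0

-- ===== PORT B =====
def solution_alt (str_skilltree : String) (lst_skillset : List String) : Int :=
  let tree := str_skilltree.toList
  let tree_set := PySem.Set.ofList tree
  lst_skillset.foldl
    (fun total skillset =>
      let ordered := skillset.toList.filter (fun c => PySem.Set.contains tree_set c)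
      total + (if tree.take ordered.length = ordered then 1 else 0))
    0

-- ===== PRECONDITION & SPEC =====
-- Pre_ excludes exactly the inputs on which A raises IndexError: some skillset whose tree-skills strictly extend the whole skilltree.
def Pre_solution (str_skilltree : String) (lst_skillset : List String) : Prop :=
  ∀ s ∈ lst_skillset,
    ¬ (str_skilltree.toList <+: s.toList.filter (fun c => decide (c ∈ str_skilltree.toList)) ∧
       str_skilltree.toList.length < (s.toList.filter (fun c => decide (c ∈ str_skilltree.toList))).length)
instance (str_skilltree : String) (lst_skillset : List String) : Decidable (Pre_solution str_skilltree lst_skillset) := by unfold Pre_solution; infer_instance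

def pvWitness_solution : String × List String := ("CBD", ["BACDE", "CBADF", "AECB", "BDA"])

def Spec_solution (str_skilltree : String) (lst_skillset : List String) (out : Int) : Prop := out = solution_alt str_skilltree lst_skillset
instance (str_skilltree : String) (lst_skillset : List String) (out : Int) : Decidable (Spec_solution str_skilltree lst_skillset out) := by unfold Spec_solution; infer_instance

-- ===== CLAIM (what is proved, stated in full; the proofs are below) =====
def Claim_equal_solution : Prop := ∀ (str_skilltree : String) (lst_skillset : List String), Dom_solution str_skilltree lst_skillset → Pre_solution str_skilltree lst_skillset → Spec_solution str_skilltree lst_skillset (solution str_skilltree lst_skillset)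

-- ===== LEMMAS AND PROOFS =====

theorem pv_contains_ofList (t : List Char) (c : Char) :
    PySem.Set.contains (PySem.Set.ofList t) c = decide (c ∈ t) := by
  by_cases h : c ∈ t <;>
    simp [h, PySem.Set.mem_ofList]

-- characterisation of A's inner loop against the filtered skillset
theorem pvALoop_eq (t : List Char) (s : List Char) (ptr : Nat) :
    pvALoop t (PySem.Set.ofList t) ptr s =
      (let o := s.filter (fun c => decide (c ∈ t));
       if o <+: t.drop ptr then some true
       else if t.drop ptr <+: o then none
       else some false) := by
  induction s generalizing ptr with
  | nil => simp [pvALoop]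
  | cons c rest ih =>
    simp only [pvALoop, pv_contains_ofList]
    by_cases hc : c ∈ t
    · simp only [hc, decide_true, if_true, List.filter_cons, PySem.List.pyGet?_natCast]
      by_cases hp : ptr < t.length
      · rw [List.getElem?_eq_getElem hp]
        have hd : List.drop ptr t = t[ptr] :: List.drop (ptr + 1) t := List.drop_eq_getElem_cons hp
        by_cases hce : c = t[ptr]
        · simp only [hce, if_true, ih (ptr + 1)]
          rw [hd]
          simp only [List.cons_prefix_cons, true_and]
        · simp only [hce, if_false, hd]
          rw [if_neg, if_neg]
          · intro h
            exact hce ((List.cons_prefix_cons.1 h).1).symm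
          · intro h
            exact hce ((List.cons_prefix_cons.1 h).1)
      · rw [List.getElem?_eq_none (by omega)]
        rw [List.drop_eq_nil_of_le (by omega)]
        simp
    · simp [hc, ih ptr]

-- per-skillset agreement under Pre_'s per-skillset condition
theorem pv_one_skillset (t : List Char) (s : List Char)
    (h : ¬ (t <+: s.filter (fun c => decide (c ∈ t)) ∧
            t.length < (s.filter (fun c => decide (c ∈ t))).length)) :
    pvALoop t (PySem.Set.ofList t) 0 s =
      some (decide (t.take (s.filter (fun c => decide (c ∈ t))).length = s.filter (fun c => decide (c ∈ t)))) := by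
  rw [pvALoop_eq]
  simp only [List.drop_zero]
  set o := s.filter (fun c => decide (c ∈ t)) with ho
  by_cases hpre : o <+: t
  · rw [if_pos hpre, eq_comm]
    simpa using (List.prefix_iff_eq_take.1 hpre).symm
  · rw [if_neg hpre, if_neg, eq_comm]
    · simp only [Option.some.injEq, decide_eq_false_iff_not]
      intro htake
      exact hpre (List.prefix_iff_eq_take.2 htake.symm)
    · intro hto
      rcases Nat.lt_or_ge t.length o.length with hl | hl
      · exact h ⟨hto, hl⟩
      · have := hto.eq_of_length_le hl
        exact hpre (by simp [this])

theorem solution_spec : Claim_equal_solution := by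
  intro t lst _hdom hpre
  unfold Spec_solution solution solution_alt
  simp only []
  -- fold with accumulator: prove by induction on lst, generalizing the accumulator
  suffices h : ∀ (l : List String), (∀ s ∈ l,
      ¬ (t.toList <+: s.toList.filter (fun c => decide (c ∈ t.toList)) ∧
         t.toList.length < (s.toList.filter (fun c => decide (c ∈ t.toList))).length)) →
      ∀ (acc : Int),
      (l.foldl
        (fun acc each =>
          acc.bind (fun tot =>
            (pvALoop t.toList (PySem.Set.ofList t.toList) 0 each.toList).map
              (fun is_ => tot + (if is_ then 1 else 0))))
        (some acc)).getD 0 =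
      l.foldl
        (fun total skillset =>
          let ordered := skillset.toList.filter (fun c => PySem.Set.contains (PySem.Set.ofList t.toList) c)
          total + (if t.toList.take ordered.length = ordered then 1 else 0))
        acc by
    exact h lst hpre 0
  intro l
  induction l with
  | nil => intro _ acc; simp
  | cons s rest ih =>
    intro hl acc
    have hs := hl s (by simp)
    rw [List.foldl_cons, List.foldl_cons, pv_one_skillset t.toList s.toList hs]
    simp only [Option.bind_some, Option.map_some]
    have hfe : s.toList.filter (fun c => PySem.Set.contains (PySem.Set.ofList t.toList) c)
        = s.toList.filter (fun c => decide (c ∈ t.toList)) := by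
      simp
    rw [hfe]
    set o := s.toList.filter (fun c => decide (c ∈ t.toList)) with ho
    by_cases hq : t.toList.take o.length = o
    · simp only [hq, decide_true, if_true]
      exact ih (fun x hx => hl x (by simp [hx])) (acc + 1)
    · simp only [hq, decide_false, if_false]
      exact ih (fun x hx => hl x (by simp [hx])) (acc + 0)

-- ===== VERDICT (by name: the statement is the Claim_ definition above) =====
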